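-- pv_equiv track=rewrite | github.com/a444930761/Machine-Learning | bayes.py | datavec
-- ===== SOURCE A (Python) =====
-- def datavec(traingdata,testdata,feauter_word): #将数据转化为向量
--     def feautervec(data,feauter_word):
--             words = set(data)
--             feautervec = [1 if i in words else 0 for i in feauter_word]
--             return feautervec
--             #这里设置默认为0，是因为MultinomialNB的alpha参数会使用平滑解决概率为0的问题
--     traingvec = [feautervec(data,feauter_word) for data in traingdata]
--     testvec = [feautervec(data,feauter_word) for data in testdata]
--     return traingvec,testvec
-- ===== SOURCE B (Python) =====
-- def datavec(traingdata, testdata, feauter_word):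
--     # Inverted traversal: index each feature word to its positions once,
--     # then per data item scan its words and set positions in a zero vector.
--     index = {}
--     for i, w in enumerate(feauter_word):
--         index.setdefault(w, []).append(i)
--     n = len(feauter_word)
--
--     def vec(data):
--         v = [0] * n
--         for w in data:
--             for p in index.get(w, []):
--                 v[p] = 1
--         return v
--
--     traingvec = [vec(d) for d in traingdata]
--     testvec = [vec(d) for d in testdata]
--     return traingvec, testvec
-- ===== Notes on version B (the rewrite author's own statement) =====
-- stated objective: alternative
-- what changed: Instead of scanning every feature word per data item (set membership per feature), B builds a word-to-positions index once and for each item writes 1s into a zero vector only at positions of words actually present in the item.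
import Mathlib
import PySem

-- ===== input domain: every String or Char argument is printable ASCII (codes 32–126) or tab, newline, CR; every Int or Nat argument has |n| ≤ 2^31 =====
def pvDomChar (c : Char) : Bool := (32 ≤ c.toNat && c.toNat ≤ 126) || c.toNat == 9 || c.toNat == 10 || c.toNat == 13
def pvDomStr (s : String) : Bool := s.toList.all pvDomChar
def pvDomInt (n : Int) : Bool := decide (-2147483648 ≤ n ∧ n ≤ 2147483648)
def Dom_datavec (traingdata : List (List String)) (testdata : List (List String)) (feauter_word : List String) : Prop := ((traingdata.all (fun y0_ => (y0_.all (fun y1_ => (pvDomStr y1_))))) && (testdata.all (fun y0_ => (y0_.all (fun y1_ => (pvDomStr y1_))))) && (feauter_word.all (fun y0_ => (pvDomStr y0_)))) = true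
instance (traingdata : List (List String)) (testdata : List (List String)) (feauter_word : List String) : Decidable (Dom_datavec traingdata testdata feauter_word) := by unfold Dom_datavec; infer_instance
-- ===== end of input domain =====

-- B builds a word→positions index once and writes 1s into a zero vector per item
-- instead of testing every feature word per item (objective: alternative traversal).

-- ===== PORT A =====
-- inner helper feautervec(data, feauter_word)
def pvFeautervec (data : List String) (feauter_word : List String) : List Int :=
  let words := PySem.Set.ofList data
  feauter_word.map (fun i => if PySem.Set.contains words i = true then 1 else 0)

def datavec (traingdata : List (List String)) (testdata : List (List String)) (feauter_word : List String) : List (List Int) × List (List Int) :=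
  let traingvec := traingdata.map (fun data => pvFeautervec data feauter_word)
  let testvec := testdata.map (fun data => pvFeautervec data feauter_word)
  (traingvec, testvec)

-- ===== PORT B =====
-- index = {}; for i, w in enumerate(feauter_word): index.setdefault(w, []).append(i)
def pvIndex (feauter_word : List String) : PySem.Dict String (List Int) :=
  (PySem.List.enumerate feauter_word).foldl
    (fun d p => d.modify p.2 [] (fun l => l ++ [p.1])) PySem.Dict.empty

-- vec(data): v = [0]*n; for w in data: for p in index.get(w, []): v[p] = 1
def pvVec (index : PySem.Dict String (List Int)) (n : Nat) (data : List String) : List Int :=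
  data.foldl
    (fun v w => (index.getD w []).foldl (fun v p => PySem.List.pySetD v p 1) v)
    (List.replicate n 0)

def datavec_alt (traingdata : List (List String)) (testdata : List (List String)) (feauter_word : List String) : List (List Int) × List (List Int) :=
  let index := pvIndex feauter_word
  let n := feauter_word.length
  let traingvec := traingdata.map (fun d => pvVec index n d)
  let testvec := testdata.map (fun d => pvVec index n d)
  (traingvec, testvec)

-- ===== PRECONDITION & SPEC =====
def Spec_datavec (traingdata : List (List String)) (testdata : List (List String)) (feauter_word : List String) (out : List (List Int) × List (List Int)) : Prop := out = datavec_alt traingdata testdata feauter_word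
instance (traingdata : List (List String)) (testdata : List (List String)) (feauter_word : List String) (out : List (List Int) × List (List Int)) : Decidable (Spec_datavec traingdata testdata feauter_word out) := by unfold Spec_datavec; infer_instance

-- ===== CLAIM (what is proved, stated in full; the proofs are below) =====
def Claim_equal_datavec : Prop := ∀ (traingdata : List (List String)) (testdata : List (List String)) (feauter_word : List String), Dom_datavec traingdata testdata feauter_word → Spec_datavec traingdata testdata feauter_word (datavec traingdata testdata feauter_word)

-- ===== LEMMAS AND PROOFS =====

-- The index maps w to the (first components of the) enumerate pairs whose word is w.
theorem pvIndex_getD (fw : List String) (w : String) :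
    (pvIndex fw).getD w [] =
      ((PySem.List.enumerate fw).filter (fun p => p.2 == w)).map (·.1) := by
  unfold pvIndex
  rw [show ((PySem.List.enumerate fw).foldl
        (fun d p => d.modify p.2 [] (fun l => l ++ [p.1])) PySem.Dict.empty)
      = (((PySem.List.enumerate fw).map (fun p => (p.2, p.1))).foldl
        (fun d p => d.modify p.1 [] (fun l => l ++ [p.2])) PySem.Dict.empty) by
    rw [List.foldl_map]]
  rw [PySem.Dict.getD_foldl_modify_append]
  simp [List.filter_map, List.map_map, Function.comp_def]

-- Membership in the index's position list.
theorem mem_enum_filter (fw : List String) (w : String) (s i : Int) :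
    (i ∈ ((PySem.List.enumerate fw s).filter (fun p => p.2 == w)).map (·.1)) ↔
      ∃ k : Nat, ∃ h : k < fw.length, fw[k] = w ∧ i = s + k := by
  induction fw generalizing s with
  | nil => simp [PySem.List.enumerate]
  | cons x xs ih =>
    rw [PySem.List.enumerate_cons]
    by_cases hx : x = w
    · subst hx
      simp only [List.filter_cons, beq_self_eq_true, if_pos, List.map_cons, List.mem_cons, ih]
      constructor
      · rintro (rfl | ⟨k, hk, hkw, rfl⟩)
        · exact ⟨0, by simp, by simp⟩
        · exact ⟨k + 1, by simp only [List.length_cons]; omega, by simpa using hkw,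
            by push_cast; ring⟩
      · rintro ⟨k, hk, hkw, rfl⟩
        cases k with
        | zero => left; simp
        | succ k =>
          right
          exact ⟨k, by simp only [List.length_cons] at hk; omega, by simpa using hkw,
            by push_cast; ring⟩
    · have : (x == w) = false := by simp [hx]
      simp only [List.filter_cons, this, if_neg, Bool.false_eq_true, not_false_iff, ih]
      constructor
      · rintro ⟨k, hk, hkw, rfl⟩
        exact ⟨k + 1, by simp only [List.length_cons]; omega, by simpa using hkw,
          by push_cast; ring⟩
      · rintro ⟨k, hk, hkw, rfl⟩
        cases k with
        | zero => exact absurd (by simpa using hkw) hx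
        | succ k => exact ⟨k, by simp only [List.length_cons] at hk; omega, by simpa using hkw,
            by push_cast; ring⟩

theorem mem_pvIndex (fw : List String) (w : String) (j : Nat) :
    ((j : Int) ∈ (pvIndex fw).getD w []) ↔ ∃ h : j < fw.length, fw[j] = w := by
  rw [pvIndex_getD]
  rw [show (PySem.List.enumerate fw) = PySem.List.enumerate fw 0 from rfl]
  rw [mem_enum_filter]
  constructor
  · rintro ⟨k, hk, hkw, hjk⟩
    have : j = k := by omega
    subst this; exact ⟨hk, hkw⟩
  · rintro ⟨h, hw⟩
    exact ⟨j, h, hw, by omega⟩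

theorem pvIndex_nonneg (fw : List String) (w : String) :
    ∀ p ∈ (pvIndex fw).getD w [], 0 ≤ p := by
  intro p hp
  rw [pvIndex_getD] at hp
  rcases (mem_enum_filter fw w 0 p).1 hp with ⟨k, _, _, rfl⟩
  omega

-- Length through the inner set loop.
theorem length_setfold (ps : List Int) (v : List Int) :
    (ps.foldl (fun v p => PySem.List.pySetD v p 1) v).length = v.length := by
  induction ps generalizing v with
  | nil => rfl
  | cons p ps ih => simp [List.foldl_cons, ih, PySem.List.length_pySetD]

-- Lookup through the inner set loop.
theorem get?_setfold (ps : List Int) (v : List Int) (h0 : ∀ p ∈ ps, 0 ≤ p) (j : Nat) :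
    (ps.foldl (fun v p => PySem.List.pySetD v p 1) v)[j]? =
      if (j : Int) ∈ ps ∧ j < v.length then some 1 else v[j]? := by
  induction ps generalizing v with
  | nil => simp
  | cons p ps ih =>
    have hp : 0 ≤ p := h0 p (by simp)
    rw [List.foldl_cons, ih _ (fun q hq => h0 q (by simp [hq])),
        PySem.List.pySetD_of_nonneg _ _ hp]
    simp only [List.length_set, List.getElem?_set, List.mem_cons]
    by_cases hmem : (j : Int) ∈ ps
    · by_cases hj : j < v.length
      · simp [hmem, hj]
      · simp only [hmem, hj, or_true, and_false, if_neg, not_false_iff]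
        rw [List.getElem?_eq_none (by omega)]
        by_cases hpj : p.toNat = j
        · simp [hpj, hj]
        · simp [hpj]
    · by_cases hpj : p.toNat = j
      · have hpj' : p = (j : Int) := by omega
        by_cases hj : j < v.length <;> simp_all
      · have hpj' : p ≠ (j : Int) := by omega
        simp [hmem, hpj, Ne.symm hpj']

-- Lookup through the per-item loop over the data's words.
theorem get?_datafold (fw : List String) (data : List String) (v : List Int) (j : Nat) :
    (data.foldl
      (fun v w => ((pvIndex fw).getD w []).foldl (fun v p => PySem.List.pySetD v p 1) v)
      v)[j]? =
      if (∃ w ∈ data, (j : Int) ∈ (pvIndex fw).getD w []) ∧ j < v.length then some 1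
      else v[j]? := by
  induction data generalizing v with
  | nil => simp
  | cons w data ih =>
    rw [List.foldl_cons, ih, length_setfold, get?_setfold _ _ (pvIndex_nonneg fw w)]
    by_cases hj : j < v.length
    · by_cases h1 : (j : Int) ∈ (pvIndex fw).getD w []
      · simp [hj, h1]
      · by_cases h2 : ∃ w' ∈ data, (j : Int) ∈ (pvIndex fw).getD w' []
        · simp [hj, h1, h2]
        · simp [hj, h1, h2]
    · simp [hj]

-- Per data item, B's vector equals A's vector.
theorem pvVec_eq (fw : List String) (data : List String) :
    pvVec (pvIndex fw) fw.length data = pvFeautervec data fw := by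
  unfold pvVec pvFeautervec
  apply List.ext_getElem?
  intro j
  rw [get?_datafold fw data _ j]
  simp only [List.length_replicate, List.getElem?_replicate, List.getElem?_map]
  by_cases hj : j < fw.length
  · have hget : fw[j]? = some fw[j] := List.getElem?_eq_getElem hj
    by_cases hmem : fw[j] ∈ data
    · have : ∃ w ∈ data, (j : Int) ∈ (pvIndex fw).getD w [] :=
        ⟨fw[j], hmem, (mem_pvIndex fw _ j).2 ⟨hj, rfl⟩⟩
      simp [hj, this, PySem.Set.mem_ofList, hmem]
    · have : ¬ ∃ w ∈ data, (j : Int) ∈ (pvIndex fw).getD w [] := by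
        rintro ⟨w, hw, hmemw⟩
        rcases (mem_pvIndex fw w j).1 hmemw with ⟨h, rfl⟩
        exact hmem hw
      simp [hj, this, PySem.Set.mem_ofList, hmem]
  · have hget : fw[j]? = none := List.getElem?_eq_none (by omega)
    simp [hj]

-- ===== VERDICT (by name: the statement is the Claim_ definition above) =====
theorem datavec_spec : Claim_equal_datavec := by
  intro traingdata testdata fw _
  unfold Spec_datavec datavec datavec_alt
  refine Prod.ext ?_ ?_ <;>
    · simp only
      exact List.map_congr_left (fun d _ => (pvVec_eq fw d).symm)
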